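-- pv_equiv track=rewrite | github.com/FABIANB3TANCOUR/proyecto-pl-asesor-financiero | motor_inferencia.py | sumar_gastos
-- ===== SOURCE A (Python) =====
-- def sumar_gastos(gastos:dict, tipos=('fijos', 'variables'), tipo_index=0, gasto_index=0, total=0):
--     # Caso base
--     if tipo_index >= len(tipos):
--         return total
--
--     tipo_actual = tipos[tipo_index]
--     lista_gastos = gastos[tipo_actual]
--
--     # termino los gastos del tipo actual
--     if gasto_index >= len(lista_gastos):
--         return sumar_gastos(gastos, tipos, tipo_index + 1, 0, total)
--
--     gasto = lista_gastos[gasto_index]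
--     nombre = list(gasto.keys())[0]
--     monto = gasto[nombre]
--
--     return sumar_gastos(gastos, tipos, tipo_index, gasto_index + 1, total + monto)
-- ===== SOURCE B (Python) =====
-- def sumar_gastos(gastos: dict, tipos=('fijos', 'variables'), tipo_index=0, gasto_index=0, total=0):
--     # Iterative nested loops with a running sum instead of A's recursion.
--     acc = total
--     for ti in range(tipo_index, len(tipos)):
--         lista = gastos[tipos[ti]]
--         start = gasto_index if ti == tipo_index else 0
--         for gasto in lista[start:]:
--             acc += gasto[list(gasto.keys())[0]]
--     return acc
-- ===== Notes on version B (the rewrite author's own statement) =====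
-- stated objective: simpler
-- what changed: Replaces A's recursion (one call per expense, threading tipo_index/gasto_index/total through the call stack) by two nested for-loops with a running sum; gasto_index only offsets the slice of the first type.
-- outside the precondition, e.g. on sumar_gastos({'f': [{'a': 1}]}, ('f',), 0, -1, 0): A returns 2, B returns 1; on sumar_gastos({'f': [{'a': 1}]}, ('f',), -1, 0, 0): A returns 2, B returns 2; on sumar_gastos({}, ('fijos', 'variables'), 0, 0, 0): A raises KeyError, B raises KeyError
import Mathlib
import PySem

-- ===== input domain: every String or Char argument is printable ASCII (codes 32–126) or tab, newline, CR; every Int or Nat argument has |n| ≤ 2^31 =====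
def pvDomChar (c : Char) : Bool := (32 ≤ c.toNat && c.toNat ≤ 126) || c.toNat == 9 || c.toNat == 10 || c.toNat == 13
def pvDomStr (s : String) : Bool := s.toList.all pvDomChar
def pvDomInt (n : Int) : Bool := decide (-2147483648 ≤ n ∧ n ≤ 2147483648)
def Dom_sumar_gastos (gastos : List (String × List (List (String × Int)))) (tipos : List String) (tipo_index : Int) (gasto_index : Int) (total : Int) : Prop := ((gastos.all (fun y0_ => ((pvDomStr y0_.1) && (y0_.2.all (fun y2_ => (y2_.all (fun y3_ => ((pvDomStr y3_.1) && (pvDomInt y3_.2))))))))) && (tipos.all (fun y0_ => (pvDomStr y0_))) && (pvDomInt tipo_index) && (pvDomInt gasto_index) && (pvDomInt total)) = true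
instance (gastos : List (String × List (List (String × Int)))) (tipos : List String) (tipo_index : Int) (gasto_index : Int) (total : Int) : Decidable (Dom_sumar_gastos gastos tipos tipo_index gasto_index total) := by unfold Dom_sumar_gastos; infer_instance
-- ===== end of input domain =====

-- B replaces A's per-expense recursion by two nested loops with a running sum (same values on Pre_; return-value equivalence).


-- ===== PORT A =====
-- Python dict lookup d[k] on an association list: first match (the type convention), none = KeyError.
def pvLookup? {α : Type} (d : List (String × α)) (k : String) : Option α :=
  (d.find? (fun p => p.1 == k)).map (·.2)

-- Termination helper only: an upper bound on the length of any expense list stored in `gastos`.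
def pvMaxLen (gastos : List (String × List (List (String × Int)))) : Nat :=
  gastos.foldr (fun p m => max p.2.length m) 0

lemma pvLookup_len_le (gastos : List (String × List (List (String × Int)))) (k : String)
    (lista : List (List (String × Int))) (h : pvLookup? gastos k = some lista) :
    lista.length ≤ pvMaxLen gastos := by
  induction gastos with
  | nil => simp [pvLookup?] at h
  | cons p rest ih =>
    simp only [pvLookup?, List.find?_cons] at h
    by_cases hk : (p.1 == k) = true
    · simp [hk] at h
      simp [pvMaxLen, ← h]
    · simp only [hk] at h
      have := ih h
      simp only [pvMaxLen, List.foldr_cons] at *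
      omega

-- Literal transliteration of A's recursion; a `none` branch returns 0 exactly where Python raises (excluded by Pre_).
def sumar_gastos (gastos : List (String × List (List (String × Int)))) (tipos : List String) (tipo_index : Int) (gasto_index : Int) (total : Int) : Int :=
  if (tipos.length : Int) ≤ tipo_index then total
  else
    match PySem.List.pyGet? tipos tipo_index with
    | none => 0    -- IndexError
    | some tipo_actual =>
      match hl : pvLookup? gastos tipo_actual with
      | none => 0  -- KeyError
      | some lista_gastos =>
        if hg : (lista_gastos.length : Int) ≤ gasto_index then
          sumar_gastos gastos tipos (tipo_index + 1) 0 total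
        else
          match PySem.List.pyGet? lista_gastos gasto_index with
          | none => 0  -- IndexError
          | some gasto =>
            match gasto.head? with
            | none => 0  -- IndexError on list(gasto.keys())[0]
            | some nv =>
              match pvLookup? gasto nv.1 with
              | none => 0
              | some monto =>
                sumar_gastos gastos tipos tipo_index (gasto_index + 1) (total + monto)
termination_by (((tipos.length : Int) - tipo_index).toNat, ((pvMaxLen gastos : Int) - gasto_index).toNat)
decreasing_by
  · apply Prod.Lex.left; omega
  · apply Prod.Lex.right'
    · omega
    · have := pvLookup_len_le gastos tipo_actual lista_gastos hl
      omega

-- ===== PORT B =====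
def sumar_gastos_alt (gastos : List (String × List (List (String × Int)))) (tipos : List String) (tipo_index : Int) (gasto_index : Int) (total : Int) : Int :=
  (PySem.List.pyRange tipo_index (tipos.length : Int) 1).foldl
    (fun acc ti =>
      let lista := (pvLookup? gastos (PySem.List.pyGetD tipos ti "")).getD []
      let start : Int := if ti = tipo_index then gasto_index else 0
      (PySem.List.slice lista (some start) none).foldl
        (fun a gasto => a + ((gasto.head?.bind (fun nv => pvLookup? gasto nv.1)).getD 0))
        acc)
    total

-- ===== PRECONDITION & SPEC =====
-- Pre_ admits any input with tipo_index ≥ len(tipos) (both programs return total at once); otherwise it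
-- restricts the traversal indices to the natural domain 0 ≤ tipo_index, 0 ≤ gasto_index (negative values are
-- internal recursion positions no caller is meant to pass: a negative gasto_index makes A revisit expenses
-- through Python's negative indexing while B slices, and on a negative tipo_index both programs wrap around
-- and usually agree — excluded as outside the intended use, not specified), and excludes the inputs where A
-- raises: a type named in tipos[tipo_index:] missing from gastos (KeyError) or an empty expense dict in the
-- traversed region (IndexError on list(gasto.keys())[0]).
def Pre_sumar_gastos (gastos : List (String × List (List (String × Int)))) (tipos : List String) (tipo_index : Int) (gasto_index : Int) (total : Int) : Prop :=
  (tipos.length : Int) ≤ tipo_index ∨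
  0 ≤ tipo_index ∧ 0 ≤ gasto_index ∧
  ∀ i ∈ List.range tipos.length, tipo_index.toNat ≤ i →
    (pvLookup? gastos (tipos.getD i "")).isSome = true ∧
    ∀ g ∈ (if i = tipo_index.toNat
           then ((pvLookup? gastos (tipos.getD i "")).getD []).drop gasto_index.toNat
           else (pvLookup? gastos (tipos.getD i "")).getD []), g ≠ []
instance (gastos : List (String × List (List (String × Int)))) (tipos : List String) (tipo_index : Int) (gasto_index : Int) (total : Int) : Decidable (Pre_sumar_gastos gastos tipos tipo_index gasto_index total) := by unfold Pre_sumar_gastos; infer_instance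

def pvWitness_sumar_gastos : (List (String × List (List (String × Int)))) × List String × Int × Int × Int :=
  ([("fijos", [[("luz", 3)], [("agua", 4)]]), ("variables", [[("cine", 5)]])], ["fijos", "variables"], 0, 0, 0)

def Spec_sumar_gastos (gastos : List (String × List (List (String × Int)))) (tipos : List String) (tipo_index : Int) (gasto_index : Int) (total : Int) (out : Int) : Prop := out = sumar_gastos_alt gastos tipos tipo_index gasto_index total
instance (gastos : List (String × List (List (String × Int)))) (tipos : List String) (tipo_index : Int) (gasto_index : Int) (total : Int) (out : Int) : Decidable (Spec_sumar_gastos gastos tipos tipo_index gasto_index total out) := by unfold Spec_sumar_gastos; infer_instance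

-- ===== CLAIM (what is proved, stated in full; the proofs are below) =====
def Claim_equal_sumar_gastos : Prop := ∀ (gastos : List (String × List (List (String × Int)))) (tipos : List String) (tipo_index : Int) (gasto_index : Int) (total : Int), Dom_sumar_gastos gastos tipos tipo_index gasto_index total → Pre_sumar_gastos gastos tipos tipo_index gasto_index total → Spec_sumar_gastos gastos tipos tipo_index gasto_index total (sumar_gastos gastos tipos tipo_index gasto_index total)

-- ===== LEMMAS AND PROOFS =====

-- The value B adds for one expense dict.
def pvVal (g : List (String × Int)) : Int := (g.head?.bind (fun nv => pvLookup? g nv.1)).getD 0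

lemma pvVal_cons (nv : String × Int) (rest : List (String × Int)) : pvVal (nv :: rest) = nv.2 := by
  simp [pvVal, pvLookup?, List.find?_cons]

-- B returns `total` once tipo_index runs off the end of tipos.
lemma alt_stop (gastos : List (String × List (List (String × Int)))) (tipos : List String)
    (ti gi total : Int) (h : (tipos.length : Int) ≤ ti) :
    sumar_gastos_alt gastos tipos ti gi total = total := by
  simp [sumar_gastos_alt, PySem.List.pyRange_one_eq_nil h]

-- Peeling one type off B's outer fold: the remaining fold is B restarted at (ti+1, 0).
lemma alt_cons (gastos : List (String × List (List (String × Int)))) (tipos : List String)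
    (ti gi total : Int) (h : ti < (tipos.length : Int)) :
    sumar_gastos_alt gastos tipos ti gi total =
      sumar_gastos_alt gastos tipos (ti + 1) 0
        ((PySem.List.slice ((pvLookup? gastos (PySem.List.pyGetD tipos ti "")).getD [])
            (some gi) none).foldl (fun a g => a + pvVal g) total) := by
  simp only [sumar_gastos_alt, pvVal]
  rw [PySem.List.pyRange_one_cons h, List.foldl_cons]
  simp only [if_pos]
  apply PySem.List.foldl_congr_mem
  intro acc t ht
  have := PySem.List.mem_pyRange_one.mp ht
  have hne : ¬ (t = ti) := by omega
  simp [hne]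

theorem sumar_gastos_main (gastos : List (String × List (List (String × Int)))) (tipos : List String) (ti gi total : Int) (hpre : Pre_sumar_gastos gastos tipos ti gi total) : sumar_gastos gastos tipos ti gi total = sumar_gastos_alt gastos tipos ti gi total := by
  by_cases hend : (tipos.length : Int) ≤ ti
  · rw [sumar_gastos, if_pos hend, alt_stop gastos tipos ti gi total hend]
  · obtain ⟨hti, hgi, hall⟩ := hpre.resolve_left hend
    rw [not_le] at hend
    have hti_lt : ti.toNat < tipos.length := by omega
    have hpg : PySem.List.pyGetD tipos ti "" = tipos.getD ti.toNat "" := by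
      rw [PySem.List.pyGetD_eq_getElem tipos "" hti hend]
      simp [List.getD_eq_getElem?_getD, List.getElem?_eq_getElem hti_lt]
    have hget : PySem.List.pyGet? tipos ti = some (tipos.getD ti.toNat "") := by
      rw [PySem.List.pyGet?_of_nonneg tipos hti]
      simp [List.getElem?_eq_getElem hti_lt, List.getD_eq_getElem?_getD]
    obtain ⟨hsome, hne⟩ := hall ti.toNat (by simp [List.mem_range]; omega) (le_refl _)
    obtain ⟨lista, hl⟩ := Option.isSome_iff_exists.mp hsome
    rw [sumar_gastos]
    simp only [if_neg (not_le.mpr hend), hget]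
    split
    next heq =>
      have hl' := hl
      rw [List.getD_eq_getElem?_getD] at hl'
      simp [hl'] at heq
    next lista' heq =>
    rw [hl] at heq
    injection heq with heq'
    subst heq'
    by_cases hg : (lista.length : Int) ≤ gi
    · rw [dif_pos hg]
      have hpre' : Pre_sumar_gastos gastos tipos (ti + 1) 0 total := by
        refine Or.inr ⟨by omega, le_refl 0, ?_⟩
        intro i hi hle
        have h1 : ti.toNat ≤ i := by omega
        obtain ⟨hs, hn⟩ := hall i hi h1
        refine ⟨hs, ?_⟩
        intro g hgmem
        have hine : i ≠ ti.toNat := by omega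
        apply hn
        simp only [if_neg hine]
        by_cases hc : i = (ti + 1).toNat
        · simp only [if_pos hc] at hgmem; simpa using hgmem
        · simpa [if_neg hc] using hgmem
      rw [sumar_gastos_main gastos tipos (ti + 1) 0 total hpre']
      rw [alt_cons gastos tipos ti gi total hend]
      have hdrop : PySem.List.slice lista (some gi) none = [] := by
        rw [PySem.List.slice_from lista hgi]
        exact List.drop_eq_nil_of_le (by omega)
      rw [hpg, hl]
      simp [hdrop]
    · rw [dif_neg hg]
      rw [not_le] at hg
      have hgi_lt : gi.toNat < lista.length := by omega
      have hget2 : PySem.List.pyGet? lista gi = some lista[gi.toNat] := by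
        rw [PySem.List.pyGet?_of_nonneg lista hgi]
        simp [List.getElem?_eq_getElem hgi_lt]
      simp only [hget2]
      have hdropc : lista[gi.toNat] :: lista.drop (gi.toNat + 1) = lista.drop gi.toNat :=
        List.getElem_cons_drop hgi_lt
      have hgne : lista[gi.toNat] ≠ [] := by
        apply hne
        simp only [hl, Option.getD_some]
        rw [← hdropc]; exact List.mem_cons_self
      obtain ⟨nv, rest, hnv⟩ : ∃ nv rest, lista[gi.toNat] = nv :: rest := by
        cases hx : lista[gi.toNat] with
        | nil => exact absurd hx hgne
        | cons a b => exact ⟨a, b, rfl⟩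
      have hmonto : pvLookup? lista[gi.toNat] nv.1 = some nv.2 := by
        rw [hnv]; simp [pvLookup?]
      rw [hnv]
      simp only [List.head?_cons]
      rw [← hnv]
      simp only [hmonto]
      have hpre' : Pre_sumar_gastos gastos tipos ti (gi + 1) (total + nv.2) := by
        refine Or.inr ⟨hti, by omega, ?_⟩
        intro i hi hle
        obtain ⟨hs, hn⟩ := hall i hi hle
        refine ⟨hs, ?_⟩
        intro g hgmem
        apply hn
        by_cases hc : i = ti.toNat
        · simp only [if_pos hc] at hgmem ⊢
          subst hc
          have : (gi + 1).toNat = gi.toNat + 1 := by omega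
          rw [this, hl] at hgmem
          simp only [Option.getD_some] at hgmem ⊢
          rw [hl]; simp only [Option.getD_some]
          rw [← hdropc]
          exact List.mem_cons_of_mem _ hgmem
        · simp only [if_neg hc] at hgmem ⊢; exact hgmem
      rw [sumar_gastos_main gastos tipos ti (gi + 1) (total + nv.2) hpre']
      rw [alt_cons gastos tipos ti gi total hend, alt_cons gastos tipos ti (gi + 1) (total + nv.2) hend]
      congr 1
      rw [hpg, hl]
      simp only [Option.getD_some]
      rw [PySem.List.slice_from lista hgi, PySem.List.slice_from lista (by omega : (0:Int) ≤ gi + 1)]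
      have h1 : (gi + 1).toNat = gi.toNat + 1 := by omega
      rw [h1, ← hdropc, List.foldl_cons, hnv, pvVal_cons]
termination_by (((tipos.length : Int) - ti).toNat, ((pvMaxLen gastos : Int) - gi).toNat)
decreasing_by
  · apply Prod.Lex.left; omega
  · apply Prod.Lex.right'
    · omega
    · have := pvLookup_len_le gastos (tipos.getD ti.toNat "") lista hl
      omega

-- ===== VERDICT (by name: the statement is the Claim_ definition above) =====
theorem sumar_gastos_spec : Claim_equal_sumar_gastos := by
  intro gastos tipos ti gi total _ hpre
  exact sumar_gastos_main gastos tipos ti gi total hpre
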